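-- pv_equiv track=rewrite | github.com/swiftwind0405/python-demo | main.py | summarize_rest_labels
-- ===== SOURCE A (Python) =====
-- from collections import OrderedDict
-- from typing import Iterable, List, Optional, Tuple
--
-- def summarize_rest_labels(labels: Iterable[str]) -> str:
--     ordered_counts: OrderedDict[str, int] = OrderedDict()
--     for label in labels:
--         ordered_counts[label] = ordered_counts.get(label, 0) + 1
--     if not ordered_counts:
--         return "无"
--     parts: List[str] = []
--     for label, count in ordered_counts.items():
--         parts.append(f"{label}×{count}" if count > 1 else label)
--     return "，".join(parts)
-- ===== SOURCE B (Python) =====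
-- def summarize_rest_labels(labels):
--     items = list(labels)
--     parts = []
--     while items:
--         head = items[0]
--         c = items.count(head)
--         parts.append(head if c == 1 else f"{head}×{c}")
--         items = [x for x in items if x != head]
--     return "，".join(parts) if parts else "无"
-- ===== Notes on version B (the rewrite author's own statement) =====
-- stated objective: alternative
-- what changed: Replaces A's single left-to-right pass accumulating counts in an ordered dict with a partition loop: count all occurrences of the first remaining label, emit its part, filter those occurrences out, and repeat on the shrinking list.
import Mathlib
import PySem

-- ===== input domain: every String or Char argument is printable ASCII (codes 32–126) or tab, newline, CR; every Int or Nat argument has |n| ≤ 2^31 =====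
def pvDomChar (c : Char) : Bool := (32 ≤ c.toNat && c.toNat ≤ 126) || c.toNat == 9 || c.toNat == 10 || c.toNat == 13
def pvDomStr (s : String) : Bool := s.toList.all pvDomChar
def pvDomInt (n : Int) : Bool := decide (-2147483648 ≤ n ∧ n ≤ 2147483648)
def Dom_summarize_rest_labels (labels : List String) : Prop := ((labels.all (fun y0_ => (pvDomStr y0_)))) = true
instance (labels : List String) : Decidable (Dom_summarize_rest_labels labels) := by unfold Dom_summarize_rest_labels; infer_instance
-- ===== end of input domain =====

-- B replaces A's single-pass ordered-dict count accumulation with a recursive partition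
-- scheme (count the first label's occurrences, filter them out, recurse); same result.

-- ===== PORT A =====
def summarize_rest_labels (labels : List String) : String :=
  let oc : PySem.Dict String Int :=
    labels.foldl (fun d label => d.insert label (d.getD label 0 + 1)) PySem.Dict.empty
  if oc.items = [] then "无"
  else
    let parts : List String :=
      oc.items.foldl (fun parts lc =>
        parts ++ [if lc.2 > 1 then lc.1 ++ "×" ++ PySem.Int.toStr lc.2 else lc.1]) []
    PySem.Str.join "，" parts

-- ===== PORT B =====
-- the while loop of Source B: take the head, count it in the whole list, filter it out, continue
def summarize_rest_labels_alt_parts (items : List String) (parts : List String) : List String :=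
  match items with
  | [] => parts
  | head :: tail =>
    let c : Int := (PySem.List.count (head :: tail) head : Int)
    summarize_rest_labels_alt_parts ((head :: tail).filter (fun x => x ≠ head))
      (parts ++ [if c == 1 then head else head ++ "×" ++ PySem.Int.toStr c])
termination_by items.length
decreasing_by
  simp only [List.filter_cons, ne_eq, decide_not, if_false, decide_true, Bool.not_true,
    Bool.false_eq_true, List.length_cons]
  have := List.length_filter_le (fun x => !decide (x = head)) tail
  omega

def summarize_rest_labels_alt (labels : List String) : String :=
  let ps := summarize_rest_labels_alt_parts labels []
  if ps = [] then "无" else PySem.Str.join "，" ps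

-- ===== PRECONDITION & SPEC =====
def Spec_summarize_rest_labels (labels : List String) (out : String) : Prop := out = summarize_rest_labels_alt labels
instance (labels : List String) (out : String) : Decidable (Spec_summarize_rest_labels labels out) := by unfold Spec_summarize_rest_labels; infer_instance

-- ===== CLAIM =====
def Claim_equal_summarize_rest_labels : Prop := ∀ (labels : List String), Dom_summarize_rest_labels labels → Spec_summarize_rest_labels labels (summarize_rest_labels labels)

-- ===== LEMMAS AND PROOFS =====

lemma filter_discard_comm (p : String → Bool) (s : List String) (x : String) :
    List.filter p (PySem.Set.discard s x) = PySem.Set.discard (List.filter p s) x := by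
  simp [PySem.Set.discard, List.filter_filter, Bool.and_comm]

lemma filter_discard_of_neg (p : String → Bool) (s : List String) (x : String) (hx : p x = false) :
    List.filter p (PySem.Set.discard s x) = List.filter p s := by
  simp only [PySem.Set.discard, List.filter_filter]
  refine List.filter_congr ?_
  intro y _
  by_cases h : y = x
  · subst h; simp [hx]
  · simp [h]

lemma ofList_filter (p : String → Bool) (t : List String) :
    PySem.Set.ofList (t.filter p) = List.filter p (PySem.Set.ofList t) := by
  induction t with
  | nil => rfl
  | cons x t ih =>
    by_cases hx : p x
    · simp only [List.filter_cons, hx, if_pos, PySem.Set.ofList_cons, ih]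
      rw [filter_discard_comm]
    · simp only [List.filter_cons, hx, Bool.false_eq_true, if_false, ih, PySem.Set.ofList_cons]
      rw [filter_discard_of_neg _ _ _ (by simpa using hx)]

lemma alt_parts_eq (items : List String) (acc : List String) :
    summarize_rest_labels_alt_parts items acc
      = acc ++ (PySem.Set.ofList items).map
          (fun k => if ((items.count k : Int)) == 1 then k
                    else k ++ "×" ++ PySem.Int.toStr (items.count k)) := by
  induction items, acc using summarize_rest_labels_alt_parts.induct with
  | case1 => simp [summarize_rest_labels_alt_parts]
  | case2 acc head tail c ih =>
    rw [summarize_rest_labels_alt_parts]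
    simp only [c, PySem.List.count_eq, dite_eq_ite] at ih
    simp only [PySem.List.count_eq]
    rw [ih, PySem.Set.ofList_cons, List.map_cons, List.append_assoc, List.singleton_append]
    have hrest : List.filter (fun x => decide (x ≠ head)) (head :: tail)
        = tail.filter (fun x => !decide (x = head)) := by
      simp
    congr 1
    have hset : PySem.Set.ofList (List.filter (fun x => decide (x ≠ head)) (head :: tail))
        = PySem.Set.discard (PySem.Set.ofList tail) head := by
      rw [hrest, ofList_filter]
      simp only [PySem.Set.discard]
      exact List.filter_congr fun y _ => by rw [Bool.eq_iff_iff]; simp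
    rw [hset]
    congr 1
    refine List.map_congr_left ?_
    intro k hk
    have hk' : k ∈ PySem.Set.ofList tail ∧ k ≠ head := by
      simpa using (PySem.Set.mem_discard _ _ _).mp hk
    have hcount : (List.filter (fun x => decide (x ≠ head)) (head :: tail)).count k
        = (head :: tail).count k := by
      have hne : ¬head = k := fun h => hk'.2 h.symm
      rw [hrest, List.count_filter (by simpa using fun h => hk'.2 h), List.count_cons]
      simp [hne]
    rw [hcount]

-- ===== VERDICT =====
theorem summarize_rest_labels_spec : Claim_equal_summarize_rest_labels := by
  intro labels _
  unfold Spec_summarize_rest_labels summarize_rest_labels summarize_rest_labels_alt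
  simp only [PySem.Dict.foldl_insert_getD_add_one_eq_counter, PySem.Dict.items_counter,
      PySem.List.foldl_append_singleton_eq_map, List.map_map, alt_parts_eq]
  by_cases hE : PySem.Set.ofList labels = []
  · simp [hE]
  · rw [if_neg (by simpa using hE), if_neg (by simpa using hE)]
    congr 1
    refine List.map_congr_left ?_
    intro k hk
    have hmem : k ∈ labels := (PySem.Set.mem_ofList _ _).mp hk
    have hc : 1 ≤ labels.count k := List.one_le_count_iff.mpr hmem
    simp only [Function.comp]
    by_cases h1 : labels.count k = 1
    · simp [h1]
    · have h2 : (1 : Int) < (labels.count k : Int) := by omega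
      rw [if_pos h2, if_neg (by simp; omega)]
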